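-- pv_equiv track=rewrite | github.com/huseynovvusal/bhos-spring-cup-2025 | solutions/F.py | max_segment_length
-- ===== SOURCE A (Python) =====
-- def max_segment_length(k, lengths):
--     left = 1
--     right = max(lengths)
--     result = 0
--
--     while left <= right:
--         mid = (left + right) // 2
--         count = sum(l // mid for l in lengths)
--
--         if count >= k:
--             result = mid
--             left = mid + 1
--         else:
--             right = mid - 1
--
--     return result
-- ===== SOURCE B (Python) =====
-- def max_segment_length(k, lengths):
--     right = max(lengths)
--     result = 0
--     for b in range(31, -1, -1):
--         cand = result + (1 << b)
--         if cand <= right and sum(l // cand for l in lengths) >= k: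
--             result = cand
--     return result
-- ===== Notes on version B (the rewrite author's own statement) =====
-- stated objective: alternative
-- what changed: Replaces A's interval-halving binary search (left/right pointers narrowing [1, max]) by a greedy bitwise construction that builds the answer from the top bit down, testing candidate = result + 2^b for b = 31..0.
-- outside the precondition, e.g. on max_segment_length(4, [27, 27, -1, -8]): A returns 6, B returns 9
import Mathlib
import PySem

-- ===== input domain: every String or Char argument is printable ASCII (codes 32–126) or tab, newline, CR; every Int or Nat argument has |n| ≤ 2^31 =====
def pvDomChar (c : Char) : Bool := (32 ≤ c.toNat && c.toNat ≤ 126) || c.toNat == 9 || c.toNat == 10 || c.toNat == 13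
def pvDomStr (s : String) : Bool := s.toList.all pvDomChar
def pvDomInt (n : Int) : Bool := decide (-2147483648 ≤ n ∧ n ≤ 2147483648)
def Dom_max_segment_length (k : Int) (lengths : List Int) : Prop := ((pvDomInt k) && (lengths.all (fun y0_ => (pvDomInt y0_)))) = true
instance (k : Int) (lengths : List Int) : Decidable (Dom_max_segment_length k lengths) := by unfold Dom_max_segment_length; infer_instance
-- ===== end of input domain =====

-- B replaces A's interval-halving binary search (left/right pointers) by a greedy
-- bitwise construction of the answer from the top bit down (objective: alternative).

-- ===== PORT A =====
-- the while-loop of A, state (left, right, result)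
def msl_loop (k : Int) (lengths : List Int) (left right result : Int) : Int :=
  if h : left ≤ right then
    let mid := PySem.Int.floordiv (left + right) 2
    let count := (lengths.map (fun l => PySem.Int.floordiv l mid)).sum
    if count ≥ k then msl_loop k lengths (mid + 1) right mid
    else msl_loop k lengths left (mid - 1) result
  else result
  termination_by (right + 1 - left).toNat
  decreasing_by
    · have := PySem.Int.floordiv_two_mid_bounds h; omega
    · have := PySem.Int.floordiv_two_mid_bounds h; omega

def max_segment_length (k : Int) (lengths : List Int) : Int :=
  match PySem.List.max? lengths (fun y => y) with
  | none => 0          -- Python's max([]) raises ValueError; excluded by Pre_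
  | some right => msl_loop k lengths 1 right 0

-- ===== PORT B =====
-- body of B's for-loop over b in range(31, -1, -1): cand = result + (1 << b);
-- (1 << b) is 2 ^ b.toNat (exact: every b in that range is in [0, 31]);
-- sum(l // cand for l in lengths) is the running-sum fold
def msl_bstep (k : Int) (lengths : List Int) (right result b : Int) : Int :=
  let cand := result + 2 ^ b.toNat
  if cand ≤ right ∧ lengths.foldl (fun s l => s + PySem.Int.floordiv l cand) 0 ≥ k then
    cand
  else result

def max_segment_length_alt (k : Int) (lengths : List Int) : Int :=
  match PySem.List.max? lengths (fun y => y) with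
  | none => 0          -- Python's max([]) raises ValueError; excluded by Pre_
  | some right => (PySem.List.pyRange 31 (-1) (-1)).foldl (msl_bstep k lengths right) 0

-- ===== PRECONDITION & SPEC =====
-- Pre_ excludes the empty list, on which both Pythons raise ValueError (max of empty
-- sequence), and mixed-sign lists (a negative length alongside a positive one), on which
-- the piece count sum(l // mid) is not monotone in mid, so A's binary-search result is an
-- accident of its probe order — a corner no caller cutting physical lengths would specify.
def Pre_max_segment_length (k : Int) (lengths : List Int) : Prop :=
  lengths ≠ [] ∧ ((∀ l ∈ lengths, 0 ≤ l) ∨ (∀ l ∈ lengths, l ≤ 0))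
instance (k : Int) (lengths : List Int) : Decidable (Pre_max_segment_length k lengths) := by
  unfold Pre_max_segment_length; infer_instance

def pvWitness_max_segment_length : Int × List Int := (2, [5, 3])

def Spec_max_segment_length (k : Int) (lengths : List Int) (out : Int) : Prop :=
  out = max_segment_length_alt k lengths
instance (k : Int) (lengths : List Int) (out : Int) : Decidable (Spec_max_segment_length k lengths out) := by
  unfold Spec_max_segment_length; infer_instance

-- ===== CLAIM (what is proved, stated in full; the proofs are below) =====
def Claim_equal_max_segment_length : Prop :=
  ∀ (k : Int) (lengths : List Int), Dom_max_segment_length k lengths →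
    Pre_max_segment_length k lengths →
    Spec_max_segment_length k lengths (max_segment_length k lengths)

-- ===== LEMMAS AND PROOFS =====

-- the piece count at segment length m, and the predicate both searches probe
def pvCnt (lengths : List Int) (m : Int) : Int :=
  (lengths.map (fun l => PySem.Int.floordiv l m)).sum

def pvP (k : Int) (lengths : List Int) (m : Int) : Prop := pvCnt lengths m ≥ k

-- what both results satisfy: the greatest m in [1, M] with pvP, or 0 when none exists
def pvX (k M : Int) (lengths : List Int) (r : Int) : Prop :=
  (r = 0 ∨ (1 ≤ r ∧ r ≤ M ∧ pvP k lengths r)) ∧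
  (∀ m : Int, 1 ≤ m → m ≤ M → pvP k lengths m → m ≤ r)

theorem pvX_unique (k M : Int) (lengths : List Int) (r1 r2 : Int)
    (h1 : pvX k M lengths r1) (h2 : pvX k M lengths r2) : r1 = r2 := by
  rcases h1 with ⟨d1, b1⟩
  rcases h2 with ⟨d2, b2⟩
  rcases d1 with rfl | ⟨h11, h12, h13⟩ <;> rcases d2 with rfl | ⟨h21, h22, h23⟩
  . rfl
  . have := b1 r2 h21 h22 h23; omega
  . have := b2 r1 h11 h12 h13; omega
  . have := b1 r2 h21 h22 h23; have := b2 r1 h11 h12 h13; omega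

-- floor division with a larger positive divisor gives a smaller quotient (numerator ≥ 0)
theorem floordiv_antitone (l a b : Int) (hl : 0 ≤ l) (ha : 1 ≤ a) (hab : a ≤ b) :
    PySem.Int.floordiv l b ≤ PySem.Int.floordiv l a := by
  have hb : (0:Int) < b := by omega
  have hq0 : 0 ≤ PySem.Int.floordiv l b :=
    (PySem.Int.le_floordiv_iff_mul_le hb).mpr (by simpa using hl)
  have hqb : PySem.Int.floordiv l b * b ≤ l :=
    (PySem.Int.le_floordiv_iff_mul_le hb).mp le_rfl
  exact (PySem.Int.le_floordiv_iff_mul_le (by omega : (0:Int) < a)).mpr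
    (le_trans (by nlinarith) hqb)

theorem pvCnt_antitone (lengths : List Int) (hnn : ∀ l, l ∈ lengths → 0 ≤ l)
    (a b : Int) (ha : 1 ≤ a) (hab : a ≤ b) :
    pvCnt lengths b ≤ pvCnt lengths a := by
  induction lengths with
  | nil => simp [pvCnt]
  | cons x t ih =>
      have hx := hnn x (by simp)
      have ht := ih (fun l hl => hnn l (by simp [hl]))
      have := floordiv_antitone x a b hx ha hab
      simp only [pvCnt, List.map_cons, List.sum_cons] at *
      omega

-- A's while loop returns the greatest satisfying m (invariant left = result + 1)
theorem msl_loop_X (k M : Int) (lengths : List Int)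
    (hdc : ∀ a b : Int, 1 ≤ a → a ≤ b → b ≤ M → pvP k lengths b → pvP k lengths a) :
    ∀ (N : Nat) (left right result : Int), (right + 1 - left).toNat ≤ N →
      1 ≤ left → left = result + 1 → right ≤ M →
      (result = 0 ∨ (1 ≤ result ∧ result ≤ M ∧ pvP k lengths result)) →
      (∀ m : Int, right < m → m ≤ M → ¬ (pvP k lengths m)) →
      pvX k M lengths (msl_loop k lengths left right result) := by
  intro N
  induction N with
  | zero =>
      intro left right result hN h1 h2 h3 h4 h5
      have hlr : ¬ (left ≤ right) := by omega
      rw [msl_loop, dif_neg hlr]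
      refine ⟨h4, ?_⟩
      intro m hm1 hm2 hp
      by_contra hgt
      exact h5 m (by omega) hm2 hp
  | succ N ihN =>
      intro left right result hN h1 h2 h3 h4 h5
      by_cases h : left ≤ right
      . rw [msl_loop]
        simp only [dif_pos h]
        have hmid := PySem.Int.floordiv_two_mid_bounds h
        set mid := PySem.Int.floordiv (left + right) 2 with hmiddef
        by_cases hc : (lengths.map (fun l => PySem.Int.floordiv l mid)).sum ≥ k
        . rw [if_pos hc]
          exact ihN (mid + 1) right mid (by omega) (by omega) (by omega) h3
            (Or.inr ⟨by omega, by omega, hc⟩) h5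
        . rw [if_neg hc]
          refine ihN left (mid - 1) result (by omega) h1 h2 (by omega) h4 ?_
          intro m hm1 hm2 hp
          by_cases hmr : right < m
          . exact h5 m hmr hm2 hp
          . exact hc (hdc mid m (by omega) (by omega) hm2 hp)
      . rw [msl_loop, dif_neg h]
        refine ⟨h4, ?_⟩
        intro m hm1 hm2 hp
        by_contra hgt
        exact h5 m (by omega) hm2 hp

-- the running-sum fold of B is pvCnt
theorem foldl_add_floordiv (lengths : List Int) (c : Int) :
    ∀ s : Int, lengths.foldl (fun s l => s + PySem.Int.floordiv l c) s = s + pvCnt lengths c := by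
  induction lengths with
  | nil => intro s; simp [pvCnt]
  | cons x t ih =>
      intro s
      rw [List.foldl_cons, ih]
      simp only [pvCnt, List.map_cons, List.sum_cons]
      ring

-- the exponent list n-1, ..., 0 that B's countdown range denotes
def pvBits (n : Nat) : List Int := (List.range n).reverse.map Int.ofNat

theorem pvBits_succ (n : Nat) : pvBits (n + 1) = Int.ofNat n :: pvBits n := by
  simp [pvBits, List.range_succ]

theorem pyRange_31 : PySem.List.pyRange 31 (-1) (-1) = pvBits 32 := by
  rw [PySem.List.pyRange_neg_one]
  have h32 : ((31:Int) - (-1)).toNat = 32 := by decide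
  rw [h32]
  apply List.ext_getElem
  · simp [pvBits]
  · intro i hi1 hi2
    have hlen : i < 32 := by simpa using hi1
    simp only [pvBits, List.getElem_map, List.getElem_reverse, List.getElem_range,
      List.length_range, Int.ofNat_eq_natCast]
    omega

-- B's bit loop over exponents n-1, ..., 0 keeps the greedy invariant and lands on pvX
theorem msl_bits_X (k M : Int) (lengths : List Int)
    (hdc : ∀ a b : Int, 1 ≤ a → a ≤ b → b ≤ M → pvP k lengths b → pvP k lengths a) :
    ∀ (n : Nat) (r : Int),
      (r = 0 ∨ (1 ≤ r ∧ r ≤ M ∧ pvP k lengths r)) →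
      (∀ m : Int, 1 ≤ m → m ≤ M → pvP k lengths m → m < r + 2 ^ n) →
      pvX k M lengths ((pvBits n).foldl (msl_bstep k lengths M) r) := by
  intro n
  induction n with
  | zero =>
      intro r h1 h2
      simp only [pvBits, List.range_zero, List.reverse_nil, List.map_nil, List.foldl_nil]
      refine ⟨h1, ?_⟩
      intro m hm1 hm2 hp
      have := h2 m hm1 hm2 hp
      simpa using by omega
  | succ n ih =>
      intro r h1 h2
      rw [pvBits_succ, List.foldl_cons]
      have hr0 : 0 ≤ r := by rcases h1 with rfl | ⟨h, _, _⟩ <;> omega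
      have hpow : (1:Int) ≤ 2 ^ n := one_le_pow₀ (by omega)
      have hstep : msl_bstep k lengths M r (Int.ofNat n) =
          if r + 2 ^ n ≤ M ∧ (lengths.map (fun l => PySem.Int.floordiv l (r + 2 ^ n))).sum ≥ k
          then r + 2 ^ n else r := by
        simp only [msl_bstep, show (Int.ofNat n).toNat = n from rfl, foldl_add_floordiv, zero_add, pvCnt]
      rw [hstep]
      by_cases hc : r + 2 ^ n ≤ M ∧ (lengths.map (fun l => PySem.Int.floordiv l (r + 2 ^ n))).sum ≥ k
      . rw [if_pos hc]
        refine ih (r + 2 ^ n) (Or.inr ⟨by omega, hc.1, hc.2⟩) ?_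
        intro m hm1 hm2 hp
        have := h2 m hm1 hm2 hp
        have h2p : (2:Int) ^ (n + 1) = 2 ^ n + 2 ^ n := by ring
        omega
      . rw [if_neg hc]
        refine ih r h1 ?_
        intro m hm1 hm2 hp
        by_contra hge
        have hcand1 : 1 ≤ r + 2 ^ n := by omega
        have hcandm : r + 2 ^ n ≤ m := by omega
        exact hc ⟨by omega, hdc (r + 2 ^ n) m hcand1 hcandm hm2 hp⟩

-- ===== VERDICT (by name: the statement is the Claim_ definition above) =====
theorem max_segment_length_spec : Claim_equal_max_segment_length := by
  intro k lengths hdom hpre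
  obtain ⟨hne, hsign⟩ := hpre
  unfold Spec_max_segment_length max_segment_length max_segment_length_alt
  rcases hM : PySem.List.max? lengths (fun y => y) with _ | M
  . exact absurd ((PySem.List.max?_eq_none_iff lengths (fun y => y)).mp hM) hne
  . simp only
    have hMmem : M ∈ lengths := PySem.List.max?_mem hM
    have hMmax : ∀ y, y ∈ lengths → y ≤ M := by
      intro y hy; simpa using PySem.List.max?_isMax hM y hy
    have hMle : M ≤ 2147483648 := by
      have hall := (List.all_eq_true.mp (Bool.and_elim_right hdom)) M hMmem
      have hM2 : (-2147483648 ≤ M ∧ M ≤ 2147483648) := by simpa [pvDomInt] using hall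
      exact hM2.2
    have hdc : ∀ a b : Int, 1 ≤ a → a ≤ b → b ≤ M → pvP k lengths b → pvP k lengths a := by
      rcases hsign with hnn | hnp
      . intro a b ha hab hbM hp
        exact le_trans hp (pvCnt_antitone lengths hnn a b ha hab)
      . intro a b ha hab hbM hp
        have := hnp M hMmem; omega
    have hA : pvX k M lengths (msl_loop k lengths 1 M 0) := by
      refine msl_loop_X k M lengths hdc (M + 1 - 1).toNat 1 M 0 (by omega) (by omega) (by omega)
        le_rfl (Or.inl rfl) ?_
      intro m hm1 hm2 _; omega
    have hB : pvX k M lengths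
        ((PySem.List.pyRange 31 (-1) (-1)).foldl (msl_bstep k lengths M) 0) := by
      rw [pyRange_31]
      refine msl_bits_X k M lengths hdc 32 0 (Or.inl rfl) ?_
      intro m hm1 hm2 hp
      have h32 : (2:Int) ^ 32 = 4294967296 := by norm_num
      omega
    exact pvX_unique k M lengths _ _ hA hB
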